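-- pv_equiv track=rewrite | github.com/fflorey/advent_of_code_2023 | 7/7a.py | find_three_same_cards
-- ===== SOURCE A (Python) =====
-- def find_three_same_cards(cards):
--     result = []
--     for card in cards:
--         counts = {}
--         for char in card:
--             counts[char] = counts.get(char, 0) + 1
--         if 3 in counts.values():
--             result.append(card)
--     return result
-- ===== SOURCE B (Python) =====
-- def _has_run_of_three(s):
--     # s is sorted, so equal characters are contiguous: scan maximal runs.
--     if not s:
--         return False
--     cur, run = s[0], 1
--     for ch in s[1:]:
--         if ch == cur:
--             run += 1
--         else:
--             if run == 3:
--                 return True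
--             cur, run = ch, 1
--     return run == 3
--
--
-- def find_three_same_cards(cards):
--     return [card for card in cards if _has_run_of_three(sorted(card))]
-- ===== Notes on version B (the rewrite author's own statement) =====
-- stated objective: alternative
-- what changed: Replaced the per-card hash-count dict (3 in counts.values()) by sorting each card's characters and scanning the sorted list's maximal runs of identical characters, selecting the card iff some run has length exactly 3.
import Mathlib
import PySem

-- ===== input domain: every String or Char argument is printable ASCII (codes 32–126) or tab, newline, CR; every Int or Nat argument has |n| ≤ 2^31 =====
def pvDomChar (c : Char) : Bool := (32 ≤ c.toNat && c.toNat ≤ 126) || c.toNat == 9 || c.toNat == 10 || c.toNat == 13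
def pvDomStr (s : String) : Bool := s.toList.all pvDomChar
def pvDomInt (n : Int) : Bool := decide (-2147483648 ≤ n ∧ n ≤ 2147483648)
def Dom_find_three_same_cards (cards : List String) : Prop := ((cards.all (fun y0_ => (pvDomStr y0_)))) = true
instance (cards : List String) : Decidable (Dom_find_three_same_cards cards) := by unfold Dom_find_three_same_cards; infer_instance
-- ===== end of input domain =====

-- B replaces A's dict-counter per card by sorting the card's characters and scanning
-- the sorted list's maximal runs, keeping cards with a run of length exactly 3 (alternative algorithm).


-- ===== PORT A =====
def find_three_same_cards (cards : List String) : List String :=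
  cards.foldl (fun result card =>
    let counts : PySem.Dict Char Int :=
      card.toList.foldl (fun d ch => d.insert ch (d.getD ch 0 + 1)) PySem.Dict.empty
    if (3 : Int) ∈ counts.values then result ++ [card] else result) []

-- ===== PORT B =====
-- the inner 'for' of _has_run_of_three: current run character, run length, remaining chars
def pvScan3 : Char → Nat → List Char → Bool
  | _, run, [] => run == 3
  | cur, run, ch :: rest =>
    if ch == cur then pvScan3 cur (run + 1) rest
    else if run == 3 then true else pvScan3 ch 1 rest

def pvHasRunOfThree : List Char → Bool
  | [] => false
  | c :: rest => pvScan3 c 1 rest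

def find_three_same_cards_alt (cards : List String) : List String :=
  cards.filter (fun card =>
    pvHasRunOfThree (PySem.List.sorted card.toList (fun x => x) false))

-- ===== PRECONDITION & SPEC =====
def Spec_find_three_same_cards (cards : List String) (out : List String) : Prop := out = find_three_same_cards_alt cards
instance (cards : List String) (out : List String) : Decidable (Spec_find_three_same_cards cards out) := by unfold Spec_find_three_same_cards; infer_instance

-- ===== CLAIM (what is proved, stated in full; the proofs are below) =====
def Claim_equal_find_three_same_cards : Prop := ∀ (cards : List String), Dom_find_three_same_cards cards → Spec_find_three_same_cards cards (find_three_same_cards cards)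

-- ===== LEMMAS AND PROOFS =====

-- invariant of the run scan on a sorted tail: it succeeds iff the pending run of `cur`
-- (begun with `run` occurrences) completes to length 3, or some later character's run has length 3
lemma pvScan3_spec (l : List Char) : ∀ (cur : Char) (run : Nat),
    (cur :: l).Pairwise (· ≤ ·) →
    (pvScan3 cur run l = true ↔
      (run + l.count cur = 3 ∨ ∃ c ∈ l, c ≠ cur ∧ l.count c = 3)) := by
  induction l with
  | nil => intro cur run _; simp [pvScan3]
  | cons ch rest ih =>
    intro cur run hp
    have hcur_ch : cur ≤ ch := (List.pairwise_cons.mp hp).1 ch (by simp)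
    have hp' : (ch :: rest).Pairwise (· ≤ ·) := (List.pairwise_cons.mp hp).2
    have hch_rest : ∀ x ∈ rest, ch ≤ x := (List.pairwise_cons.mp hp').1
    by_cases h : ch = cur
    · subst h
      rw [show pvScan3 ch run (ch :: rest) = pvScan3 ch (run + 1) rest by simp [pvScan3]]
      rw [ih ch (run + 1) hp']
      constructor
      · rintro (h1 | ⟨c, hc, hne, hcnt⟩)
        · left; rw [List.count_cons_self]; omega
        · right
          refine ⟨c, by simp [hc], hne, ?_⟩
          rw [List.count_cons_of_ne (Ne.symm hne)]; exact hcnt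
      · rintro (h1 | ⟨c, hc, hne, hcnt⟩)
        · left; rw [List.count_cons_self] at h1; omega
        · right
          rcases List.mem_cons.mp hc with rfl | hc'
          · exact absurd rfl hne
          · rw [List.count_cons_of_ne (Ne.symm hne)] at hcnt
            exact ⟨c, hc', hne, hcnt⟩
    · -- run boundary: cur < ch, so cur never occurs again
      have hlt : cur < ch := lt_of_le_of_ne hcur_ch (fun e => h e.symm)
      have hcur_notin : cur ∉ ch :: rest := by
        intro hm
        rcases List.mem_cons.mp hm with rfl | hm'
        · exact absurd rfl h
        · exact absurd (hch_rest _ hm') (not_le.mpr hlt)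
      rw [show pvScan3 cur run (ch :: rest) =
            (if run = 3 then true else pvScan3 ch 1 rest) by
          simp [pvScan3, h]]
      have hcnt0 : (ch :: rest).count cur = 0 := List.count_eq_zero.mpr hcur_notin
      rw [hcnt0]
      by_cases hr : run = 3
      · rw [if_pos hr]
        constructor
        · intro _; exact Or.inl (by omega)
        · intro _; rfl
      · rw [if_neg hr, ih ch 1 hp']
        constructor
        · rintro (h1 | ⟨c, hc, hne, hcnt⟩)
          · right
            refine ⟨ch, by simp, fun e => h e, ?_⟩
            rw [List.count_cons_self]; omega
          · right
            refine ⟨c, by simp [hc], fun e => hcur_notin (e ▸ List.mem_cons_of_mem ch hc), ?_⟩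
            rw [List.count_cons_of_ne (Ne.symm hne)]; exact hcnt
        · rintro (h1 | ⟨c, hc, hne, hcnt⟩)
          · exact absurd (by omega : run = 3) hr
          · rcases List.mem_cons.mp hc with rfl | hc'
            · left; rw [List.count_cons_self] at hcnt; omega
            · by_cases hcc : c = ch
              · subst hcc; left; rw [List.count_cons_self] at hcnt; omega
              · right
                rw [List.count_cons_of_ne (Ne.symm hcc)] at hcnt
                exact ⟨c, hc', hcc, hcnt⟩

-- B's per-card test characterised: some character of s occurs exactly 3 times in s
lemma pvHasRunOfThree_sorted (s : List Char) :
    pvHasRunOfThree (PySem.List.sorted s (fun x => x) false) = true ↔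
      ∃ c ∈ s, s.count c = 3 := by
  have hperm : (PySem.List.sorted s (fun x => x) false).Perm s := PySem.List.sorted_perm ..
  have hpw : (PySem.List.sorted s (fun x => x) false).Pairwise (· ≤ ·) := by
    simpa using PySem.List.sorted_pairwise s (fun x => x)
  rcases hsort : PySem.List.sorted s (fun x => x) false with _ | ⟨c, rest⟩
  · rw [hsort] at hperm
    have hs : s = [] := hperm.symm.eq_nil
    subst hs; simp [pvHasRunOfThree]
  · rw [hsort] at hperm hpw
    have key : pvScan3 c 1 rest = true ↔ ∃ d ∈ c :: rest, (c :: rest).count d = 3 := by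
      rw [pvScan3_spec rest c 1 hpw]
      constructor
      · rintro (h1 | ⟨d, hd, hne, hcnt⟩)
        · exact ⟨c, by simp, by rw [List.count_cons_self]; omega⟩
        · refine ⟨d, by simp [hd], ?_⟩
          rw [List.count_cons_of_ne (Ne.symm hne)]; exact hcnt
      · rintro ⟨d, hd, hcnt⟩
        by_cases hdc : d = c
        · subst hdc; left; rw [List.count_cons_self] at hcnt; omega
        · rcases List.mem_cons.mp hd with rfl | hd'
          · exact absurd rfl hdc
          · rw [List.count_cons_of_ne (Ne.symm hdc)] at hcnt
            exact Or.inr ⟨d, hd', hdc, hcnt⟩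
    show pvScan3 c 1 rest = true ↔ _
    rw [key]
    constructor
    · rintro ⟨d, hd, hcnt⟩
      exact ⟨d, hperm.mem_iff.mp hd, by rw [← hperm.count_eq]; exact hcnt⟩
    · rintro ⟨d, hd, hcnt⟩
      exact ⟨d, hperm.mem_iff.mpr hd, by rw [hperm.count_eq]; exact hcnt⟩

-- A's per-card test characterised the same way
lemma dict_test_iff (l : List Char) :
    ((3 : Int) ∈ (l.foldl (fun d ch => d.insert ch (d.getD ch 0 + 1)) PySem.Dict.empty).values)
      ↔ ∃ c ∈ l, l.count c = 3 := by
  rw [PySem.Dict.foldl_insert_getD_add_one_eq_counter]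
  simp only [PySem.Dict.values, PySem.Dict.items_counter, List.map_map, List.mem_map,
    Function.comp, PySem.Set.mem_ofList]
  constructor
  · rintro ⟨c, hc, hv⟩
    exact ⟨c, hc, by exact_mod_cast hv⟩
  · rintro ⟨c, hc, hv⟩
    exact ⟨c, hc, by exact_mod_cast hv⟩

-- the per-card boolean tests of the two ports agree
lemma card_test_eq (card : String) :
    ((3 : Int) ∈ (card.toList.foldl (fun d ch => d.insert ch (d.getD ch 0 + 1)) PySem.Dict.empty).values)
      ↔ pvHasRunOfThree (PySem.List.sorted card.toList (fun x => x) false) = true := by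
  rw [dict_test_iff, pvHasRunOfThree_sorted]

-- ===== VERDICT (by name: the statement is the Claim_ definition above) =====
theorem find_three_same_cards_spec : Claim_equal_find_three_same_cards := by
  intro cards _
  unfold Spec_find_three_same_cards find_three_same_cards find_three_same_cards_alt
  have h : (List.foldl (fun result card =>
      let counts : PySem.Dict Char Int :=
        card.toList.foldl (fun d ch => d.insert ch (d.getD ch 0 + 1)) PySem.Dict.empty
      if (3 : Int) ∈ counts.values then result ++ [card] else result) [] cards)
      = List.foldl (fun result card =>
        if pvHasRunOfThree (PySem.List.sorted card.toList (fun x => x) false) then result ++ [card] else result) [] cards := by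
    apply List.foldl_ext
    intro acc card _
    by_cases hb : pvHasRunOfThree (PySem.List.sorted card.toList (fun x => x) false) = true
    · rw [if_pos ((card_test_eq card).mpr hb), if_pos hb]
    · rw [if_neg (fun hm => hb ((card_test_eq card).mp hm)), if_neg hb]
  rw [h, PySem.List.foldl_append_if_eq_filter _ cards []]
  simp
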